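-- pv_equiv track=rewrite | github.com/heyimcarlos/semester-4 | dsa/labs/02/lab.py | example5
-- ===== SOURCE A (Python) =====
-- def example5(first, second):
--     """Returns the number of times second array stores sum of prefix sums from first."""
--     count = 0  # O(1) - constant time
--     for i in range(len(first)):  # O(n) - linear time
--         total = 0  # O(1) - constant time
--         for j in range(len(first)):  # nested O(n) - linear time
--             for k in range(j + 1):  # nested O(n) - linear time
--                 total += first[k]  # O(1) - constant time
--         if second[i] == total:
--             count += 1  # O(1) - constant time
--     return count
-- ===== SOURCE B (Python) =====
-- def example5(first, second):
--     # One pass: the inner double loop of A always computes the same fixed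
--     # total (the sum of all prefix sums of `first`); compute it once with a
--     # running prefix sum, then count matches in a single scan.
--     total = 0
--     running = 0
--     for x in first:
--         running += x
--         total += running
--     count = 0
--     for v in second[:len(first)]:
--         if v == total:
--             count += 1
--     return count
-- ===== Notes on version B (the rewrite author's own statement) =====
-- stated objective: faster
-- what changed: Replaced the triple nested index loop (which recomputes the same sum of prefix sums for every i) by one running-prefix-sum pass computing the total once, followed by a single counting scan of second[:len(first)].
import Mathlib
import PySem

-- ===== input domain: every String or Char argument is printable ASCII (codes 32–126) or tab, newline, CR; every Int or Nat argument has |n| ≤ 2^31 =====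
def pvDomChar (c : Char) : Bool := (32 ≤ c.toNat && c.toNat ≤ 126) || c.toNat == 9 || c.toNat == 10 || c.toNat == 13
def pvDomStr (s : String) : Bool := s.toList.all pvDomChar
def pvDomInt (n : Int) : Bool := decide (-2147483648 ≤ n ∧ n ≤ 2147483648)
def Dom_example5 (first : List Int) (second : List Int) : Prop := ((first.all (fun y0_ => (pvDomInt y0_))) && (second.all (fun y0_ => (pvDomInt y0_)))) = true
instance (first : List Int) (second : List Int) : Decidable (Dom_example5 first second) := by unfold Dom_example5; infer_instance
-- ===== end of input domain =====

-- B computes the fixed total (A's inner double loop, the sum of all prefix sums of `first`)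
-- once with a single running-sum pass, then counts matches of second[:len(first)] in one scan.


-- ===== PORT A =====
def example5 (first : List Int) (second : List Int) : Int :=
  (PySem.List.pyRange 0 (first.length : Int) 1).foldl (fun count i =>
    let total :=
      (PySem.List.pyRange 0 (first.length : Int) 1).foldl (fun t j =>
        (PySem.List.pyRange 0 (j + 1) 1).foldl (fun t2 k =>
          t2 + PySem.List.pyGetD first k 0) t) 0
    if PySem.List.pyGetD second i 0 == total then count + 1 else count) 0

-- ===== PORT B =====
def example5_alt (first : List Int) (second : List Int) : Int :=
  let p := first.foldl (fun (s : Int × Int) x => (s.1 + x, s.2 + (s.1 + x))) (0, 0)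
  (PySem.List.slice second none (some (first.length : Int))).foldl
    (fun c v => if v == p.2 then c + 1 else c) 0

-- ===== PRECONDITION & SPEC =====
-- A indexes second[i] for every i < len(first), so it raises IndexError when second is shorter;
-- Pre_ admits exactly the inputs on which A returns.
def Pre_example5 (first : List Int) (second : List Int) : Prop :=
  first.length ≤ second.length
instance (first : List Int) (second : List Int) : Decidable (Pre_example5 first second) := by
  unfold Pre_example5; infer_instance
def pvWitness_example5 : List Int × List Int := ([1, 2], [4, 3])

def Spec_example5 (first : List Int) (second : List Int) (out : Int) : Prop :=
  out = example5_alt first second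
instance (first : List Int) (second : List Int) (out : Int) : Decidable (Spec_example5 first second out) := by
  unfold Spec_example5; infer_instance

-- ===== CLAIM (what is proved, stated in full; the proofs are below) =====
def Claim_equal_example5 : Prop := ∀ (first : List Int) (second : List Int), Dom_example5 first second → Pre_example5 first second → Spec_example5 first second (example5 first second)

-- ===== LEMMAS AND PROOFS =====

-- A's innermost loop over range(j+1) sums the first j+1 entries of `first`.
lemma inner_step (first : List Int) (j t : Int) (h0 : 0 ≤ j) (h1 : j < (first.length : Int)) :
    (PySem.List.pyRange 0 (j + 1) 1).foldl (fun t2 k => t2 + PySem.List.pyGetD first k 0) t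
      = t + (first.take (j.toNat + 1)).sum := by
  set m := j.toNat + 1 with hm
  have hml : (first.take m).length = m := by simp [hm]; omega
  have hb : j + 1 = ((first.take m).length : Int) := by rw [hml]; omega
  have hcong : ∀ (acc k : Int), k ∈ PySem.List.pyRange 0 ((first.take m).length : Int) 1 →
      acc + PySem.List.pyGetD first k 0 = acc + PySem.List.pyGetD (first.take m) k 0 := by
    intro acc k hk
    rw [PySem.List.mem_pyRange_one, hml] at hk
    rw [PySem.List.pyGetD_eq_getElem _ _ hk.1 (by omega),
        PySem.List.pyGetD_eq_getElem _ _ hk.1 (by rw [hml]; exact_mod_cast hk.2)]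
    congr 1
    exact (List.getElem_take).symm
  rw [hb, PySem.List.foldl_congr_mem _ _ _ _ hcong,
    PySem.List.foldl_pyRange_zero_pyGetD',
    show (HAdd.hAdd : Int → Int → Int) = (fun acc x => acc + id x) from rfl,
    PySem.List.foldl_add]
  simp

-- A's middle double loop computes the sum over j < len(first) of the (j+1)-element prefix sums.
lemma example5_inner_total (first : List Int) :
    (PySem.List.pyRange 0 (first.length : Int) 1).foldl (fun t j =>
        (PySem.List.pyRange 0 (j + 1) 1).foldl (fun t2 k =>
          t2 + PySem.List.pyGetD first k 0) t) 0
      = ((List.range first.length).map (fun j => (first.take (j + 1)).sum)).sum := by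
  have hcong : ∀ (acc j : Int), j ∈ PySem.List.pyRange 0 (first.length : Int) 1 →
      (PySem.List.pyRange 0 (j + 1) 1).foldl (fun t2 k =>
          t2 + PySem.List.pyGetD first k 0) acc
        = acc + (first.take (j.toNat + 1)).sum := by
    intro acc j hj
    rw [PySem.List.mem_pyRange_one] at hj
    exact inner_step first j acc hj.1 hj.2
  rw [PySem.List.foldl_congr_mem _ _ _ _ hcong,
    PySem.List.foldl_add (PySem.List.pyRange 0 (first.length : Int) 1)
      (fun j : Int => (first.take (j.toNat + 1)).sum) 0,
    PySem.List.pyRange_zero_natCast]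
  simp [List.map_map, Function.comp_def]

-- B's running-sum pass: second accumulator = t + Σ_{j<len xs} (r + prefix-sum of xs.take (j+1)).
lemma example5_alt_total (xs : List Int) (r t : Int) :
    (xs.foldl (fun (s : Int × Int) x => (s.1 + x, s.2 + (s.1 + x))) (r, t)).2
      = t + ((List.range xs.length).map (fun j => r + (xs.take (j + 1)).sum)).sum := by
  induction xs generalizing r t with
  | nil => simp
  | cons x xs ih =>
    simp only [List.foldl_cons, ih, List.length_cons, List.range_succ_eq_map,
      List.map_cons, List.map_map, List.sum_cons]
    have h : ((fun j => r + ((x :: xs).take (j + 1)).sum) ∘ Nat.succ)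
        = fun j => r + x + (xs.take (j + 1)).sum := by
      funext j
      simp [List.take_succ_cons]; ring
    rw [h]
    simp [List.take_succ_cons]
    ring

lemma example5_main (first second : List Int) (hp : first.length ≤ second.length) :
    example5 first second = example5_alt first second := by
  unfold example5 example5_alt
  simp only [example5_inner_total]
  set T := ((List.range first.length).map (fun j => (first.take (j + 1)).sum)).sum with hT
  have hbt : (first.foldl (fun (s : Int × Int) x => (s.1 + x, s.2 + (s.1 + x))) (0, 0)).2 = T := by
    rw [example5_alt_total]; simp [hT]
  have hml : (second.take first.length).length = first.length := by simp; omega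
  have hcong : ∀ (acc i : Int), i ∈ PySem.List.pyRange 0 ((second.take first.length).length : Int) 1 →
      (if PySem.List.pyGetD second i 0 == T then acc + 1 else acc)
        = (if PySem.List.pyGetD (second.take first.length) i 0 == T then acc + 1 else acc) := by
    intro acc i hi
    rw [PySem.List.mem_pyRange_one, hml] at hi
    rw [PySem.List.pyGetD_eq_getElem _ _ hi.1 (by omega),
        PySem.List.pyGetD_eq_getElem _ _ hi.1 (by rw [hml]; exact_mod_cast hi.2)]
    simp [List.getElem_take]
  rw [PySem.List.slice_to_natCast]
  conv_lhs => rw [show (first.length : Int) = ((second.take first.length).length : Int) from by rw [hml]]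
  rw [PySem.List.foldl_congr_mem _ _ _ _ hcong,
    PySem.List.foldl_pyRange_zero_pyGetD' (second.take first.length) 0
      (fun acc v => if v == T then acc + 1 else acc) 0,
    PySem.List.foldl_beq_add_one, hbt,
    PySem.List.foldl_beq_add_one]

-- ===== VERDICT (by name: the statement is the Claim_ definition above) =====
theorem example5_spec : Claim_equal_example5 := by
  intro first second _ hp
  unfold Spec_example5
  exact example5_main first second hp
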